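-- pv_equiv track=rewrite | github.com/loghithakshan/INBLOODO-AGENT26 | src/agent/agent_orchestrator.py | _sort_interpretations
-- ===== SOURCE A (Python) =====
-- from typing import Dict, List, Any, Optional
--
-- def _sort_interpretations(interpretations: List[str]) -> List[str]:
--     """Sort interpretations by severity and importance."""
--     if not interpretations:
--         return []
--
--     def severity_score(text: str) -> tuple:
--         text_lower = text.lower()
--         # Return (severity_level, text) for sorting
--         if any(w in text_lower for w in ["critical", "severe", "emergency"]):
--             return (0, text)  # Highest priority
--         elif any(w in text_lower for w in ["abnormal", "high", "low", "elevated"]):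
--             return (1, text)
--         elif any(w in text_lower for w in ["normal", "regular"]):
--             return (2, text)
--         else:
--             return (3, text)
--
--     return sorted(interpretations, key=severity_score)
-- ===== SOURCE B (Python) =====
-- from typing import List
--
-- def _sort_interpretations(interpretations: List[str]) -> List[str]:
--     """Partition into severity buckets, sort each bucket by text, concatenate."""
--     buckets = ([], [], [], [])
--     for text in interpretations:
--         t = text.lower()
--         if any(w in t for w in ("critical", "severe", "emergency")):
--             i = 0
--         elif any(w in t for w in ("abnormal", "high", "low", "elevated")):
--             i = 1
--         elif any(w in t for w in ("normal", "regular")):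
--             i = 2
--         else:
--             i = 3
--         buckets[i].append(text)
--     return sorted(buckets[0]) + sorted(buckets[1]) + sorted(buckets[2]) + sorted(buckets[3])
-- ===== Notes on version B (the rewrite author's own statement) =====
-- stated objective: alternative
-- what changed: Replaces the single composite-key sorted() with a one-pass partition into four severity buckets followed by a plain lexicographic sort of each bucket and concatenation.
import Mathlib
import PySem

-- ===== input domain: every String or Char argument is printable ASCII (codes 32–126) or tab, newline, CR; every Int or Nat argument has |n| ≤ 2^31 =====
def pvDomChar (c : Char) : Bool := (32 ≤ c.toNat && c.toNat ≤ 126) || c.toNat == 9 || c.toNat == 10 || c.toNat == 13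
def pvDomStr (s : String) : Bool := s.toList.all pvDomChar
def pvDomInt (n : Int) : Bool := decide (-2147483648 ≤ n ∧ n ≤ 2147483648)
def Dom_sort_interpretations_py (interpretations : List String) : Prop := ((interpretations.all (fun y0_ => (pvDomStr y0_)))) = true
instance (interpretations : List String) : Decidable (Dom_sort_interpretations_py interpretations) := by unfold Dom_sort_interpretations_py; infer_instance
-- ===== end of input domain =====

-- B partitions the strings into the four severity buckets in one pass, sorts each bucket
-- lexicographically and concatenates, instead of A's single sorted() with a composite (level, text) key.


-- ===== PORT A =====
-- the severity level both Pythons compute with the same keyword checks in the same priority order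
def sevLevelT (t : String) : Int :=
  if PySem.Str.isIn "critical" t || PySem.Str.isIn "severe" t || PySem.Str.isIn "emergency" t then 0
  else if PySem.Str.isIn "abnormal" t || PySem.Str.isIn "high" t || PySem.Str.isIn "low" t
      || PySem.Str.isIn "elevated" t then 1
  else if PySem.Str.isIn "normal" t || PySem.Str.isIn "regular" t then 2
  else 3

def sevLevel (text : String) : Int := sevLevelT (PySem.Str.lower text)

-- sorted(interpretations, key=severity_score) with the tuple key (severity_level, text)
def sort_interpretations_py (interpretations : List String) : List String :=
  if interpretations = [] then []
  else PySem.List.sorted2 interpretations (fun t => sevLevel t) (fun t => t)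

-- ===== PORT B =====
-- buckets[i].append(text) for the bucket chosen by sevLevel
def addBucket (acc : List String × List String × List String × List String) (text : String) :
    List String × List String × List String × List String :=
  let i := sevLevel text
  if i = 0 then (acc.1 ++ [text], acc.2.1, acc.2.2.1, acc.2.2.2)
  else if i = 1 then (acc.1, acc.2.1 ++ [text], acc.2.2.1, acc.2.2.2)
  else if i = 2 then (acc.1, acc.2.1, acc.2.2.1 ++ [text], acc.2.2.2)
  else (acc.1, acc.2.1, acc.2.2.1, acc.2.2.2 ++ [text])

def sort_interpretations_py_alt (interpretations : List String) : List String :=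
  let b := interpretations.foldl addBucket ([], [], [], [])
  PySem.List.sorted b.1 (fun x => x) ++ PySem.List.sorted b.2.1 (fun x => x)
    ++ PySem.List.sorted b.2.2.1 (fun x => x) ++ PySem.List.sorted b.2.2.2 (fun x => x)

-- ===== PRECONDITION & SPEC =====
def Spec_sort_interpretations_py (interpretations : List String) (out : List String) : Prop := out = sort_interpretations_py_alt interpretations
instance (interpretations : List String) (out : List String) : Decidable (Spec_sort_interpretations_py interpretations out) := by unfold Spec_sort_interpretations_py; infer_instance

-- ===== CLAIM (what is proved, stated in full; the proofs are below) =====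
def Claim_equal_sort_interpretations_py : Prop := ∀ (interpretations : List String), Dom_sort_interpretations_py interpretations → Spec_sort_interpretations_py interpretations (sort_interpretations_py interpretations)

-- ===== LEMMAS AND PROOFS =====

-- the combined (level, text) key A sorts by, as a single lexicographic key
def skey (x : String) : Lex (Int × String) := toLex (sevLevel x, x)

lemma skey_injective : Function.Injective skey := by
  intro a b h
  have h' : (sevLevel a, a) = (sevLevel b, b) := toLex.injective h
  exact (Prod.ext_iff.mp h').2

lemma sevLevel_cases (x : String) :
    sevLevel x = 0 ∨ sevLevel x = 1 ∨ sevLevel x = 2 ∨ sevLevel x = 3 := by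
  unfold sevLevel sevLevelT; split_ifs <;> simp

lemma sorted2_eq_sorted_skey (xs : List String) :
    PySem.List.sorted2 xs (fun t => sevLevel t) (fun t => t) = PySem.List.sorted xs skey := by
  have hf : (fun a b : String =>
        decide (sevLevel a < sevLevel b) || (!decide (sevLevel b < sevLevel a) && decide (a < b)))
      = (fun a b : String => decide (skey a < skey b)) := by
    funext a b
    simp only [skey, Prod.Lex.toLex_lt_toLex]
    rcases lt_trichotomy (sevLevel a) (sevLevel b) with h | h | h
    · simp [h]
    · simp [h]
    · simp [h, lt_asymm h, h.ne']
  simp only [PySem.List.sorted2, PySem.List.sorted, Bool.false_eq_true, if_false]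
  rw [hf]

-- B's partition loop computes the four level-filters of the input, appended to the accumulator
lemma foldl_addBucket (xs : List String) (a b c d : List String) :
    xs.foldl addBucket (a, b, c, d) =
      (a ++ xs.filter (fun x => sevLevel x = 0),
       b ++ xs.filter (fun x => sevLevel x = 1),
       c ++ xs.filter (fun x => sevLevel x = 2),
       d ++ xs.filter (fun x => sevLevel x = 3)) := by
  induction xs generalizing a b c d with
  | nil => simp
  | cons x xs ih =>
    rcases sevLevel_cases x with h | h | h | h <;>
      simp [addBucket, h, ih, List.append_assoc]

-- the four level-filters partition the input, up to permutation
lemma perm_filters (xs : List String) :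
    xs.Perm (xs.filter (fun x => sevLevel x = 0) ++ xs.filter (fun x => sevLevel x = 1)
      ++ xs.filter (fun x => sevLevel x = 2) ++ xs.filter (fun x => sevLevel x = 3)) := by
  induction xs with
  | nil => simp
  | cons x xs ih =>
    rcases sevLevel_cases x with h | h | h | h
    · simpa [List.filter_cons, h] using ih.cons x
    · simp only [List.filter_cons, h]
      norm_num
      refine (ih.cons x).trans ?_
      simpa [List.append_assoc] using
        (List.perm_middle (a := x) (l₁ := xs.filter (fun x => sevLevel x = 0))
          (l₂ := xs.filter (fun x => sevLevel x = 1) ++ xs.filter (fun x => sevLevel x = 2)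
            ++ xs.filter (fun x => sevLevel x = 3))).symm
    · simp only [List.filter_cons, h]
      norm_num
      refine (ih.cons x).trans ?_
      simpa [List.append_assoc] using
        (List.perm_middle (a := x)
          (l₁ := xs.filter (fun x => sevLevel x = 0) ++ xs.filter (fun x => sevLevel x = 1))
          (l₂ := xs.filter (fun x => sevLevel x = 2) ++ xs.filter (fun x => sevLevel x = 3))).symm
    · simp only [List.filter_cons, h]
      norm_num
      refine (ih.cons x).trans ?_
      simpa [List.append_assoc] using
        (List.perm_middle (a := x)
          (l₁ := xs.filter (fun x => sevLevel x = 0) ++ xs.filter (fun x => sevLevel x = 1)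
            ++ xs.filter (fun x => sevLevel x = 2))
          (l₂ := xs.filter (fun x => sevLevel x = 3))).symm

lemma mem_sorted_filter {x : String} {xs : List String} {p : String → Prop} [DecidablePred p]
    (h : x ∈ PySem.List.sorted (xs.filter (fun y => decide (p y))) (fun y => y)) : p x := by
  have := (PySem.List.mem_sorted _ _ _ _).mp h
  simpa using (List.mem_filter.mp this).2

lemma skey_le_of_level_lt {a b : String} (h : sevLevel a < sevLevel b) : skey a ≤ skey b :=
  le_of_lt (Prod.Lex.toLex_lt_toLex.mpr (Or.inl h))

lemma skey_le_of_level_eq {a b : String} (h : sevLevel a = sevLevel b) (h2 : a ≤ b) :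
    skey a ≤ skey b :=
  Prod.Lex.toLex_le_toLex.mpr (Or.inr ⟨h, h2⟩)

-- within one bucket the sort by text is a sort by skey (all levels equal)
lemma pairwise_bucket (xs : List String) (i : Int) :
    (PySem.List.sorted (xs.filter (fun y => sevLevel y = i)) (fun y => y)).Pairwise
      (fun a b => skey a ≤ skey b) := by
  have hp := PySem.List.sorted_pairwise (xs := xs.filter (fun y => sevLevel y = i))
    (key := fun y : String => y)
  refine hp.imp_of_mem ?_
  intro a b ha hb hle
  have ha' : sevLevel a = i := mem_sorted_filter (p := fun y => sevLevel y = i) ha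
  have hb' : sevLevel b = i := mem_sorted_filter (p := fun y => sevLevel y = i) hb
  exact skey_le_of_level_eq (ha'.trans hb'.symm) hle

lemma pairwise_alt (xs : List String) :
    (sort_interpretations_py_alt xs).Pairwise (fun a b => skey a ≤ skey b) := by
  have hb := foldl_addBucket xs [] [] [] []
  simp only [sort_interpretations_py_alt, hb, List.nil_append]
  have key_cross : ∀ (i j : Int), i < j → ∀ a b : String,
      a ∈ PySem.List.sorted (xs.filter (fun y => sevLevel y = i)) (fun y => y) →
      b ∈ PySem.List.sorted (xs.filter (fun y => sevLevel y = j)) (fun y => y) →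
      skey a ≤ skey b := by
    intro i j hij a b ha hb
    have ha' : sevLevel a = i := mem_sorted_filter (p := fun y => sevLevel y = i) ha
    have hb' : sevLevel b = j := mem_sorted_filter (p := fun y => sevLevel y = j) hb
    exact skey_le_of_level_lt (by rw [ha', hb']; exact hij)
  rw [List.pairwise_append, List.pairwise_append, List.pairwise_append]
  refine ⟨⟨⟨pairwise_bucket xs 0, pairwise_bucket xs 1, ?_⟩, pairwise_bucket xs 2, ?_⟩,
    pairwise_bucket xs 3, ?_⟩
  · intro a ha b hb
    exact key_cross 0 1 (by norm_num) a b ha hb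
  · intro a ha b hb
    rcases List.mem_append.mp ha with h | h
    · exact key_cross 0 2 (by norm_num) a b h hb
    · exact key_cross 1 2 (by norm_num) a b h hb
  · intro a ha b hb
    rcases List.mem_append.mp ha with h | h
    · rcases List.mem_append.mp h with h' | h'
      · exact key_cross 0 3 (by norm_num) a b h' hb
      · exact key_cross 1 3 (by norm_num) a b h' hb
    · exact key_cross 2 3 (by norm_num) a b h hb

lemma perm_alt (xs : List String) : (PySem.List.sorted xs skey).Perm (sort_interpretations_py_alt xs) := by
  have hb := foldl_addBucket xs [] [] [] []
  simp only [sort_interpretations_py_alt, hb, List.nil_append]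
  refine (PySem.List.sorted_perm xs skey false).trans ?_
  refine (perm_filters xs).trans ?_
  exact ((((PySem.List.sorted_perm _ _ _).symm.append
    (PySem.List.sorted_perm _ _ _).symm).append
    (PySem.List.sorted_perm _ _ _).symm).append
    (PySem.List.sorted_perm _ _ _).symm)

-- ===== VERDICT (by name: the statement is the Claim_ definition above) =====
theorem sort_interpretations_py_spec : Claim_equal_sort_interpretations_py := by
  intro xs _
  show sort_interpretations_py xs = sort_interpretations_py_alt xs
  rcases xs with _ | ⟨x, xs⟩
  · rfl
  · rw [sort_interpretations_py, if_neg (by simp), sorted2_eq_sorted_skey]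
    exact PySem.List.eq_of_perm_of_pairwise_le_of_injective skey skey_injective
      (perm_alt (x :: xs))
      (PySem.List.sorted_pairwise (xs := x :: xs) (key := skey))
      (pairwise_alt (x :: xs))
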